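-- pv_equiv track=rewrite | github.com/c334706598/Ultracold-molecule-simulation-CUHK | coherence sim.py | find_flip_pair
-- ===== SOURCE A (Python) =====
-- def find_flip_pair(index1, index2):
--     temp = index1^index2
--     res = []
--     count = 0
--     while temp != 0:
--         if temp % 2 == 1:
--             res.append(count)
--         temp //= 2
--         count += 1
--     return res
-- ===== SOURCE B (Python) =====
-- def find_flip_pair(index1, index2):
--     x = index1 ^ index2
--     return [i for i, c in enumerate(bin(x)[2:][::-1]) if c == '1']
-- ===== Notes on version B (the rewrite author's own statement) =====
-- stated objective: idiomatic
-- what changed: Replaces the %2-and-//2 while-loop accumulator with a one-liner that materializes the binary string via bin(x)[2:], reverses it, and collects the positions of '1' characters with an enumerate comprehension.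
import Mathlib
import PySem

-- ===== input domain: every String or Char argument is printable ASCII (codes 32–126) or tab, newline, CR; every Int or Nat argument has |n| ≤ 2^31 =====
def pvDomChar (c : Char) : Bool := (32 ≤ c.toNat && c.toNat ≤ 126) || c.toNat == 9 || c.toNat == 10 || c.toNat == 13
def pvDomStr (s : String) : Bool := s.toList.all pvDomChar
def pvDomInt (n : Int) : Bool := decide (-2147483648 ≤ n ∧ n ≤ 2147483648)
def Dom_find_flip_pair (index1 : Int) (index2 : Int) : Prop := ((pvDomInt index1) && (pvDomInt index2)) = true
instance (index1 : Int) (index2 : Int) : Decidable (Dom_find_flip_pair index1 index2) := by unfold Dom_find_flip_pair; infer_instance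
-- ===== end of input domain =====

-- B replaces A's %2-and-//2 while-loop with building the binary string once and one
-- enumerate pass over its reversed digits (idiomatic; return value only, no mutation).

-- ===== PORT A =====
-- the while loop; the `temp ≤ 0` guard only makes the recursion total:
-- Python stops at temp = 0 and diverges for temp < 0 (excluded by Pre_).
def findFlipLoop (temp : Int) (count : Int) (res : List Int) : List Int :=
  if _h : temp ≤ 0 then res
  else
    findFlipLoop (PySem.Int.floordiv temp 2) (count + 1)
      (if PySem.Int.mod temp 2 = 1 then res ++ [count] else res)
termination_by temp.toNat
decreasing_by
  have h2 : PySem.Int.floordiv temp 2 = temp / 2 :=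
    PySem.Int.floordiv_eq_ediv_of_pos (by omega)
  omega

def find_flip_pair (index1 : Int) (index2 : Int) : List Int :=
  findFlipLoop (PySem.Int.bxor index1 index2) 0 []

-- ===== PORT B =====
-- bin(n) for n > 0, most-significant digit first (the part of bin(x) after "0b")
def binDigits (n : Nat) : List Char :=
  if n = 0 then [] else binDigits (n / 2) ++ [if n % 2 = 1 then '1' else '0']

-- bin(x)[2:] as a character list (for x < 0, bin gives '-0b…', so [2:] keeps the 'b')
def pyBinTail (x : Int) : List Char :=
  if x < 0 then 'b' :: (if x.natAbs = 0 then ['0'] else binDigits x.natAbs)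
  else if x = 0 then ['0'] else binDigits x.toNat

def find_flip_pair_alt (index1 : Int) (index2 : Int) : List Int :=
  let x := PySem.Int.bxor index1 index2
  ((PySem.List.enumerate (pyBinTail x).reverse 0).filter (fun p => p.2 = '1')).map
    (fun p => p.1)

-- ===== PRECONDITION & SPEC =====
-- Pre_ excludes inputs whose XOR is negative: there A's while-loop never terminates
-- (temp //= 2 stalls at -1), so A returns no value.
def Pre_find_flip_pair (index1 : Int) (index2 : Int) : Prop :=
  0 ≤ PySem.Int.bxor index1 index2
instance (index1 : Int) (index2 : Int) : Decidable (Pre_find_flip_pair index1 index2) := by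
  unfold Pre_find_flip_pair; infer_instance

def pvWitness_find_flip_pair : Int × Int := (5, 6)

def Spec_find_flip_pair (index1 : Int) (index2 : Int) (out : List Int) : Prop := out = find_flip_pair_alt index1 index2
instance (index1 : Int) (index2 : Int) (out : List Int) : Decidable (Spec_find_flip_pair index1 index2 out) := by unfold Spec_find_flip_pair; infer_instance

-- ===== CLAIM (what is proved, stated in full; the proofs are below) =====
def Claim_equal_find_flip_pair : Prop := ∀ (index1 : Int) (index2 : Int), Dom_find_flip_pair index1 index2 → Pre_find_flip_pair index1 index2 → Spec_find_flip_pair index1 index2 (find_flip_pair index1 index2)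

-- ===== LEMMAS AND PROOFS =====

-- canonical description: positions of set bits of n, counting from c
def bitPos (n : Nat) (c : Int) : List Int :=
  if n = 0 then [] else (if n % 2 = 1 then [c] else []) ++ bitPos (n / 2) (c + 1)
termination_by n
decreasing_by omega

-- A's loop computes res ++ bitPos
theorem findFlipLoop_eq (n : Nat) : ∀ (c : Int) (res : List Int),
    findFlipLoop (n : Int) c res = res ++ bitPos n c := by
  induction n using Nat.strong_induction_on with
  | _ n ih =>
    intro c res
    rw [findFlipLoop, bitPos]
    by_cases h0 : n = 0
    · simp [h0]
    · have hpos : ¬ ((n : Int) ≤ 0) := by omega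
      rw [dif_neg hpos]
      have hd : PySem.Int.floordiv (n : Int) 2 = ((n / 2 : Nat) : Int) := by
        exact_mod_cast PySem.Int.floordiv_natCast n 2
      have hm : PySem.Int.mod (n : Int) 2 = ((n % 2 : Nat) : Int) := by
        exact_mod_cast PySem.Int.mod_natCast n 2
      rw [hd, hm, ih (n / 2) (by omega)]
      by_cases hmod : n % 2 = 1
      · simp [hmod, h0]
      · simp [hmod, h0]
        omega

-- LSB-first binary digits
def lsbDigits (n : Nat) : List Char :=
  if n = 0 then [] else (if n % 2 = 1 then '1' else '0') :: lsbDigits (n / 2)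
termination_by n
decreasing_by omega

theorem binDigits_reverse (n : Nat) : (binDigits n).reverse = lsbDigits n := by
  induction n using Nat.strong_induction_on with
  | _ n ih =>
    rw [binDigits, lsbDigits]
    by_cases h0 : n = 0
    · simp [h0]
    · simp [h0, ih (n / 2) (by omega)]

-- B's enumerate pass over lsbDigits computes bitPos
theorem enum_lsb_eq (n : Nat) : ∀ (c : Int),
    ((PySem.List.enumerate (lsbDigits n) c).filter (fun p => p.2 = '1')).map (fun p => p.1)
      = bitPos n c := by
  induction n using Nat.strong_induction_on with
  | _ n ih =>
    intro c
    rw [lsbDigits, bitPos]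
    by_cases h0 : n = 0
    · simp [h0, PySem.List.enumerate_nil]
    · rw [if_neg h0, if_neg h0, PySem.List.enumerate_cons]
      by_cases hmod : n % 2 = 1
      · simp [hmod, List.filter, ih (n / 2) (by omega)]
      · simp [hmod, List.filter, ih (n / 2) (by omega)]

-- ===== VERDICT (by name: the statement is the Claim_ definition above) =====
theorem find_flip_pair_spec : Claim_equal_find_flip_pair := by
  intro i1 i2 _ hpre
  unfold Spec_find_flip_pair find_flip_pair find_flip_pair_alt
  have hpre' : 0 ≤ PySem.Int.bxor i1 i2 := hpre
  obtain ⟨m, hm⟩ : ∃ m : Nat, PySem.Int.bxor i1 i2 = (m : Int) :=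
    ⟨(PySem.Int.bxor i1 i2).toNat, by omega⟩
  rw [hm, findFlipLoop_eq]
  show [] ++ bitPos m 0 =
    ((PySem.List.enumerate (pyBinTail (m : Int)).reverse 0).filter
      (fun p => p.2 = '1')).map (fun p => p.1)
  unfold pyBinTail
  have hneg : ¬ ((m : Int) < 0) := by omega
  rw [if_neg hneg]
  by_cases h0 : m = 0
  · subst h0
    simp [bitPos, PySem.List.enumerate]
  · have h0' : ¬ ((m : Int) = 0) := by omega
    rw [if_neg h0', Int.toNat_natCast, binDigits_reverse, enum_lsb_eq]
    simp
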